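-- pv_equiv track=rewrite | github.com/atreydesai/clsurveytool | extract_latex_stats.py | generate_papers_by_period_stats
-- ===== SOURCE A (Python) =====
-- from collections import defaultdict, Counter
--
-- def get_year(entry):
--     year_str = str(entry.get('year', '') or entry.get('publication_year', '') or '').strip()
--     try:
--         # Handle "2023" or "2023-01-01"
--         y = int(year_str.split('-')[0]) if year_str else None
--         if y and 1900 <= y <= 2100:
--             return y
--         return None
--     except ValueError:
--         return None
--
-- def generate_papers_by_period_stats(entries):
--     # Bin logic: 5-year buckets starting 1971
--     # 71-75 (1), 76-80 (2), ... 21-25 (11)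
--
--     # Bucket 1: 1971-1975
--     # Bucket 11: 2021-2025
--
--     buckets = defaultdict(int)
--
--     for e in entries:
--         year = get_year(e)
--         if year:
--             if year < 1971: continue
--             if year > 2025: continue
--
--             # 1971 -> bucket 0 (internal) -> 1 (latex)
--             # (year - 1971) // 5
--             b_idx = (year - 1971) // 5
--             buckets[b_idx + 1] += 1
--
--     # Generate coords for 1..11 — (count, index) for horizontal bar chart
--     coords = []
--     for i in range(1, 12):
--         count = buckets[i]
--         coords.append(f"({count},{i})")
--
--     return " ".join(coords)
-- ===== SOURCE B (Python) =====
-- def get_year(entry):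
--     year_str = str(entry.get('year', '') or entry.get('publication_year', '') or '').strip()
--     try:
--         # Handle "2023" or "2023-01-01"
--         y = int(year_str.split('-')[0]) if year_str else None
--         if y and 1900 <= y <= 2100:
--             return y
--         return None
--     except ValueError:
--         return None
--
-- def generate_papers_by_period_stats(entries):
--     # Collect valid years once, then count per 5-year period 1..11.
--     years = [y for y in (get_year(e) for e in entries) if y is not None]
--     coords = []
--     for i in range(1, 12):
--         lo = 1966 + 5 * i
--         hi = 1970 + 5 * i
--         count = sum(1 for y in years if lo <= y <= hi)
--         coords.append(f"({count},{i})")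
--     return " ".join(coords)
-- ===== Notes on version B (the rewrite author's own statement) =====
-- stated objective: alternative
-- what changed: Replaces A's single pass that maintains a running defaultdict of 5-year buckets with one pass collecting the valid years followed by a per-period counting scan over the 11 inclusive ranges [1966+5i, 1970+5i].
import Mathlib
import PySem

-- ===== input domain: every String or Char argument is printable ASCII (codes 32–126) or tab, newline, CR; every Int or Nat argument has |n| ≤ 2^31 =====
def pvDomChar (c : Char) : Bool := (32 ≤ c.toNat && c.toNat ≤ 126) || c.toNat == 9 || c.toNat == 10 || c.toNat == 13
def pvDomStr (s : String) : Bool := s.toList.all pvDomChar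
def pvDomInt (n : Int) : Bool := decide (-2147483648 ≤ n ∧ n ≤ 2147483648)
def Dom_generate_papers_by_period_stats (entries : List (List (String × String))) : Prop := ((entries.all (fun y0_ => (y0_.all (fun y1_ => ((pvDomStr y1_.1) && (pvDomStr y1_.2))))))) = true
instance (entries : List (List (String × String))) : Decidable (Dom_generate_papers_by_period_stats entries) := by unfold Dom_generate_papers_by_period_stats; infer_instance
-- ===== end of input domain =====

-- B replaces A's running defaultdict of buckets by one pass collecting valid years
-- followed by a per-period counting scan (objective: alternative decomposition).

-- ===== PORT A =====

-- entry.get(k, '') : first-match lookup in the association list, default ""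
def pyDictGetStr (e : List (String × String)) (k : String) : String :=
  match e.find? (fun p => p.1 == k) with
  | some p => p.2
  | none => ""

-- shared module helper get_year (identical in Source A and Source B)
def get_year (e : List (String × String)) : Option Int :=
  -- str(entry.get('year','') or entry.get('publication_year','') or '').strip()
  let v1 := pyDictGetStr e "year"
  let v2 := pyDictGetStr e "publication_year"
  let year_str := PySem.Str.strip (if v1 ≠ "" then v1 else if v2 ≠ "" then v2 else "")
  if year_str ≠ "" then
    -- int(year_str.split('-')[0]); ValueError → None
    match PySem.Int.ofStr? (((PySem.Str.split? year_str "-").getD []).headD "") with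
    | none => none
    | some y => if y ≠ 0 ∧ 1900 ≤ y ∧ y ≤ 2100 then some y else none
  else none  -- y = None, 'if y' is false

-- the body of A's 'for e in entries' loop, acting on the running defaultdict
def bucketStep (d : PySem.Dict Int Int) (e : List (String × String)) : PySem.Dict Int Int :=
  match get_year e with
  | some year =>
      if year ≠ 0 then          -- 'if year:'
        if year < 1971 then d
        else if 2025 < year then d
        else d.modify (PySem.Int.floordiv (year - 1971) 5 + 1) 0 (· + 1)
      else d
  | none => d

def generate_papers_by_period_stats (entries : List (List (String × String))) : String :=
  let buckets : PySem.Dict Int Int := entries.foldl bucketStep PySem.Dict.empty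
  let coords := (PySem.List.pyRange 1 12 1).map (fun i =>
    "(" ++ PySem.Int.toStr (buckets.getD i 0) ++ "," ++ PySem.Int.toStr i ++ ")")
  PySem.Str.join " " coords

-- ===== PORT B =====
def generate_papers_by_period_stats_alt (entries : List (List (String × String))) : String :=
  let years := entries.filterMap get_year
  let coords := (PySem.List.pyRange 1 12 1).map (fun i =>
    let lo := 1966 + 5 * i
    let hi := 1970 + 5 * i
    let count : Int := ((years.filter (fun y => decide (lo ≤ y ∧ y ≤ hi))).length : Int)
    "(" ++ PySem.Int.toStr count ++ "," ++ PySem.Int.toStr i ++ ")")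
  PySem.Str.join " " coords

-- ===== PRECONDITION & SPEC =====
def Spec_generate_papers_by_period_stats (entries : List (List (String × String))) (out : String) : Prop := out = generate_papers_by_period_stats_alt entries
instance (entries : List (List (String × String))) (out : String) : Decidable (Spec_generate_papers_by_period_stats entries out) := by unfold Spec_generate_papers_by_period_stats; infer_instance

-- ===== CLAIM (what is proved, stated in full; the proofs are below) =====
def Claim_equal_generate_papers_by_period_stats : Prop := ∀ (entries : List (List (String × String))), Dom_generate_papers_by_period_stats entries → Spec_generate_papers_by_period_stats entries (generate_papers_by_period_stats entries)

-- ===== LEMMAS AND PROOFS =====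

/-- The bucket key A's loop increments for a valid year, if any. -/
def keyf (y : Int) : Option Int :=
  if y ≠ 0 ∧ 1971 ≤ y ∧ y ≤ 2025 then some (PySem.Int.floordiv (y - 1971) 5 + 1) else none

lemma bucketStep_eq (d : PySem.Dict Int Int) (e : List (String × String)) :
    bucketStep d e = match (get_year e).bind keyf with
      | some k => d.modify k 0 (· + 1)
      | none => d := by
  unfold bucketStep keyf
  cases get_year e with
  | none => rfl
  | some y =>
    dsimp only [Option.bind_some]
    split_ifs <;> first | rfl | omega

lemma fold_eq_keys (entries : List (List (String × String))) (d : PySem.Dict Int Int) :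
    entries.foldl bucketStep d
      = (entries.filterMap (fun e => (get_year e).bind keyf)).foldl
          (fun d x => d.modify x 0 (· + 1)) d := by
  induction entries generalizing d with
  | nil => rfl
  | cons e rest ih =>
    rw [List.foldl_cons, List.filterMap_cons, bucketStep_eq]
    cases (get_year e).bind keyf <;> simp only [List.foldl_cons] <;> exact ih _

lemma key_iff (i y : Int) (hi1 : 1 ≤ i) (hi2 : i ≤ 11) :
    (y ≠ 0 ∧ 1971 ≤ y ∧ y ≤ 2025 ∧ PySem.Int.floordiv (y - 1971) 5 + 1 = i)
    ↔ (1966 + 5 * i ≤ y ∧ y ≤ 1970 + 5 * i) := by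
  constructor
  · rintro ⟨-, h1, h2, h3⟩
    rw [PySem.Int.floordiv_eq_ediv_of_pos (by norm_num : (0:Int) < 5)] at h3
    omega
  · intro h
    rw [PySem.Int.floordiv_eq_ediv_of_pos (by norm_num : (0:Int) < 5)]
    omega

lemma count_keyf (years : List Int) (i : Int) (hi1 : 1 ≤ i) (hi2 : i ≤ 11) :
    (years.filterMap keyf).count i
      = (years.filter (fun y => decide (1966 + 5 * i ≤ y ∧ y ≤ 1970 + 5 * i))).length := by
  induction years with
  | nil => rfl
  | cons y ys ih =>
    rw [List.filterMap_cons, List.filter_cons]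
    by_cases hy : 1966 + 5 * i ≤ y ∧ y ≤ 1970 + 5 * i
    · have hc := (key_iff i y hi1 hi2).2 hy
      have hk : keyf y = some i := by
        unfold keyf
        rw [if_pos ⟨hc.1, hc.2.1, hc.2.2.1⟩, hc.2.2.2]
      rw [hk, if_pos (by simpa using hy)]
      simp [ih]
    · by_cases hc : y ≠ 0 ∧ 1971 ≤ y ∧ y ≤ 2025
      · have hkey : ¬((y - 1971) / 5 + 1 = i) := fun h =>
          hy ((key_iff i y hi1 hi2).1 ⟨hc.1, hc.2.1, hc.2.2, by
            rw [PySem.Int.floordiv_eq_ediv_of_pos (by norm_num : (0:Int) < 5)]; exact h⟩)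
        have hk : keyf y = some (PySem.Int.floordiv (y - 1971) 5 + 1) := by
          unfold keyf; rw [if_pos hc]
        rw [hk, if_neg (by simpa using hy)]
        simp [hkey, ih]
      · have hk : keyf y = none := by unfold keyf; rw [if_neg hc]
        rw [hk, if_neg (by simpa using hy)]
        exact ih

-- ===== VERDICT (by name: the statement is the Claim_ definition above) =====
theorem generate_papers_by_period_stats_spec : Claim_equal_generate_papers_by_period_stats := by
  intro entries _
  unfold Spec_generate_papers_by_period_stats
  unfold generate_papers_by_period_stats generate_papers_by_period_stats_alt
  rw [fold_eq_keys]
  refine congrArg (PySem.Str.join " ") (List.map_congr_left ?_)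
  intro i hi
  rw [PySem.List.mem_pyRange_one] at hi
  rw [← List.filterMap_filterMap, PySem.Dict.getD_foldl_modify_add_one, PySem.Dict.getD_empty,
      count_keyf (entries.filterMap get_year) i hi.1 (by omega)]
  norm_num
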